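-- pv_equiv track=rewrite | github.com/DragunWF/Competitive-Programming | CodeChef/Contests/START54/Incomplete/EQDIS.py | solve
-- ===== SOURCE A (Python) =====
-- from collections import Counter
--
-- def solve(n, a):
--     counter, distinct = Counter(a).values(), 0
--     for value in counter:
--         if value <= 2:
--             distinct += value
--         else:
--             return "NO"
--     return "YES" if distinct % 2 == 0 else "NO"
-- ===== SOURCE B (Python) =====
-- def solve(n, a):
--     s = sorted(a)
--     for x, y, z in zip(s, s[1:], s[2:]):
--         if x == y == z:
--             return "NO"
--     return "YES" if len(a) % 2 == 0 else "NO"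
-- ===== Notes on version B (the rewrite author's own statement) =====
-- stated objective: alternative
-- what changed: Replaces the Counter frequency table and running sum with a sort followed by a three-element sliding-window scan for a triple of equal values, deriving the answer's parity from len(a) directly.
import Mathlib
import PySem

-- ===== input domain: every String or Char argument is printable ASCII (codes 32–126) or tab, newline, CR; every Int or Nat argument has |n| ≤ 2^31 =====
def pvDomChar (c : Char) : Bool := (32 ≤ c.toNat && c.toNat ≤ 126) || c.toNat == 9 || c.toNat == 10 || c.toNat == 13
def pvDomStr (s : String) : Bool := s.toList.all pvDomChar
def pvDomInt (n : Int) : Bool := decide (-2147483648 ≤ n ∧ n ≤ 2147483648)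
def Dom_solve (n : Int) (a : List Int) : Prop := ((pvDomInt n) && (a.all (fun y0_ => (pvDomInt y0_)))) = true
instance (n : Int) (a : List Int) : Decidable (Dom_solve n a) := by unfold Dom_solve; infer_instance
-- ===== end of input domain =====

-- B replaces A's Counter frequency table + running sum by sort + a sliding-window scan for three equal consecutive elements, taking the parity from len(a) (alternative decomposition).


-- ===== PORT A =====
-- A's 'for value in counter' loop: none = early 'return "NO"', some d = the final distinct
def solveLoopA : List Int → Int → Option Int
  | [], distinct => some distinct
  | v :: rest, distinct => if v ≤ 2 then solveLoopA rest (distinct + v) else none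

def solve (n : Int) (a : List Int) : String :=
  match solveLoopA (PySem.Dict.counter a).values 0 with
  | none => "NO"
  | some distinct => if PySem.Int.mod distinct 2 == 0 then "YES" else "NO"

-- ===== PORT B =====
-- B's 'for x, y, z in zip(s, s[1:], s[2:])' loop: true = early 'return "NO"'
def tripleScan : List Int → Bool
  | x :: y :: z :: rest => if x == y && y == z then true else tripleScan (y :: z :: rest)
  | _ => false

def solve_alt (n : Int) (a : List Int) : String :=
  let s := PySem.List.sorted a (fun x => x) false
  if tripleScan s then "NO"
  else if PySem.Int.mod (PySem.List.len a) 2 == 0 then "YES" else "NO"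

-- ===== PRECONDITION & SPEC =====
def Spec_solve (n : Int) (a : List Int) (out : String) : Prop := out = solve_alt n a
instance (n : Int) (a : List Int) (out : String) : Decidable (Spec_solve n a out) := by unfold Spec_solve; infer_instance

-- ===== CLAIM (what is proved, stated in full; the proofs are below) =====
def Claim_equal_solve : Prop := ∀ (n : Int) (a : List Int), Dom_solve n a → Spec_solve n a (solve n a)

-- ===== LEMMAS AND PROOFS =====

-- in a sorted (non-decreasing) list, a value of multiplicity ≥ 3 shows up as three consecutive equal elements, and conversely
theorem tripleScan_iff (s : List Int) :
    s.Pairwise (· ≤ ·) → (tripleScan s = true ↔ ∃ v, 3 ≤ s.count v) := by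
  induction s using tripleScan.induct with
  | case1 x y z rest heq =>
    intro _
    simp only [Bool.and_eq_true, beq_iff_eq] at heq
    obtain ⟨hxy, hyz⟩ := heq
    constructor
    · intro _
      refine ⟨x, ?_⟩
      subst hxy; subst hyz
      simp [List.count_cons]
    · intro _
      simp [tripleScan, hxy, hyz]
  | case2 x y z rest hne ih =>
    intro hs
    simp only [List.pairwise_cons] at hs
    obtain ⟨hx, hy, hz, hrest⟩ := hs
    simp only [Bool.and_eq_true, beq_iff_eq] at hne
    have hnb : ¬ ((x == y) && (y == z)) = true := by
      simp only [Bool.and_eq_true, beq_iff_eq]; exact hne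
    simp only [tripleScan, if_neg hnb]
    have hsy : (y :: z :: rest).Pairwise (· ≤ ·) := by
      simp only [List.pairwise_cons]; exact ⟨hy, hz, hrest⟩
    rw [ih hsy]
    constructor
    · rintro ⟨v, hv⟩
      refine ⟨v, le_trans hv ?_⟩
      simp [List.count_cons]
    · rintro ⟨v, hv⟩
      by_cases hvx : x = v
      · exfalso
        subst hvx
        have h2 : 2 ≤ (y :: z :: rest).count x := by
          simp [List.count_cons] at hv ⊢; omega
        have hxy : x ≤ y := hx y (by simp)
        have hyx : y = x := by
          by_contra hne2
          have h1 : 2 ≤ (z :: rest).count x := by rwa [List.count_cons_of_ne hne2] at h2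
          have hmem : x ∈ z :: rest := List.count_pos_iff.mp (by omega)
          exact hne2 (le_antisymm (hy x hmem) hxy)
        subst hyx
        have h1 : 1 ≤ (z :: rest).count y := by
          simp [List.count_cons] at h2 ⊢; omega
        have hzx : z = y := by
          by_contra hne3
          have h0 : 1 ≤ rest.count y := by rwa [List.count_cons_of_ne hne3] at h1
          have hmem : y ∈ rest := List.count_pos_iff.mp (by omega)
          have hzl : z ≤ y := hz y hmem
          have hyz : y ≤ z := hy z (by simp)
          omega
        exact hne ⟨rfl, hzx.symm⟩
      · refine ⟨v, ?_⟩
        rwa [List.count_cons_of_ne hvx] at hv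
  | case3 t hshape =>
    intro _
    constructor
    · intro h
      exfalso
      match t, hshape with
      | [], _ => simp [tripleScan] at h
      | [x], _ => simp [tripleScan] at h
      | [x, y], _ => simp [tripleScan] at h
      | x :: y :: z :: rest, hsh => exact absurd rfl (hsh x y z rest)
    · rintro ⟨v, hv⟩
      have hlen : t.length ≤ 2 := by
        match t, hshape with
        | [], _ => simp
        | [x], _ => simp
        | [x, y], _ => simp
        | x :: y :: z :: rest, hsh => exact absurd rfl (hsh x y z rest)
      have := List.count_le_length (a := v) (l := t)
      omega

theorem solveLoopA_eq (vs : List Int) (acc : Int) :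
    solveLoopA vs acc = if ∀ v ∈ vs, v ≤ 2 then some (acc + vs.sum) else none := by
  induction vs generalizing acc with
  | nil => simp [solveLoopA]
  | cons v rest ih =>
    simp only [solveLoopA, ih]
    split_ifs with h1 h2 h3 h4 <;> simp_all <;> omega

theorem values_counter (a : List Int) :
    (PySem.Dict.counter a).values = (PySem.Set.ofList a).map (fun k => ((a.count k : Nat) : Int)) := by
  have h := PySem.Dict.items_counter a
  simp only [PySem.Dict.values, h, List.map_map]
  rfl

theorem perm_dedup (a : List Int) : (PySem.Set.ofList a).Perm a.dedup := by
  apply List.perm_of_nodup_nodup_toFinset_eq (PySem.Set.nodup_ofList a) a.nodup_dedup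
  ext x
  simp [PySem.Set.mem_ofList]

theorem sum_counts (a : List Int) :
    ((PySem.Set.ofList a).map (fun k => ((a.count k : Nat) : Int))).sum = (a.length : Int) := by
  have hp : ((PySem.Set.ofList a).map (fun k => ((a.count k : Nat) : Int))).Perm
      (a.dedup.map (fun k => ((a.count k : Nat) : Int))) := (perm_dedup a).map _
  rw [hp.sum_eq]
  have h2 : (a.dedup.map (fun k => ((a.count k : Nat) : Int)))
      = (a.dedup.map a.count).map (fun m : Nat => (m : Int)) := by
    simp [List.map_map, Function.comp]
  rw [h2, ← Nat.cast_list_sum, List.sum_map_count_dedup_eq_length]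

theorem solve_eq_solve_alt (n : Int) (a : List Int) : solve n a = solve_alt n a := by
  unfold solve solve_alt
  rw [values_counter, solveLoopA_eq]
  have hsp : (PySem.List.sorted a (fun x => x) false).Perm a := PySem.List.sorted_perm a _ _
  have hpw : (PySem.List.sorted a (fun x => x) false).Pairwise (· ≤ ·) :=
    PySem.List.sorted_pairwise a _
  have hts := tripleScan_iff _ hpw
  have hcount : ∀ v, (PySem.List.sorted a (fun x => x) false).count v = a.count v :=
    fun v => hsp.count_eq v
  by_cases hex : ∃ v, 3 ≤ a.count v
  · have ht : tripleScan (PySem.List.sorted a (fun x => x) false) = true := by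
      rw [hts]
      obtain ⟨v, hv⟩ := hex
      exact ⟨v, by rw [hcount]; exact hv⟩
    have hcond : ¬ ∀ v ∈ (PySem.Set.ofList a).map (fun k => ((a.count k : Nat) : Int)), v ≤ 2 := by
      obtain ⟨v, hv⟩ := hex
      intro hall
      have hvmem : v ∈ PySem.Set.ofList a := by
        rw [PySem.Set.mem_ofList]
        exact List.count_pos_iff.mp (by omega)
      have := hall _ (List.mem_map_of_mem hvmem)
      omega
    rw [if_neg hcond]
    simp [ht]
  · have hcond : ∀ v ∈ (PySem.Set.ofList a).map (fun k => ((a.count k : Nat) : Int)), v ≤ 2 := by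
      intro v hv
      obtain ⟨k, hk, rfl⟩ := List.mem_map.mp hv
      have : ¬ 3 ≤ a.count k := fun h => hex ⟨k, h⟩
      omega
    have ht : tripleScan (PySem.List.sorted a (fun x => x) false) = false := by
      rw [Bool.eq_false_iff]
      intro h
      obtain ⟨v, hv⟩ := hts.mp h
      rw [hcount] at hv
      exact hex ⟨v, hv⟩
    rw [if_pos hcond]
    simp only [ht, if_false, Bool.false_eq_true]
    rw [sum_counts, zero_add]
    simp [PySem.List.len_eq]

-- ===== VERDICT (by name: the statement is the Claim_ definition above) =====
theorem solve_spec : Claim_equal_solve := by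
  intro n a _
  exact solve_eq_solve_alt n a
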